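-- pv_equiv track=rewrite | github.com/AlifSrSE/ProblemSolves | 2055B-crafting.py | solve
-- ===== SOURCE A (Python) =====
-- def solve(a, b):
--     diffs = [b[i] - a[i] for i in range(len(a))]
--     positive_indices = [i for i, diff in enumerate(diffs) if diff > 0]
--
--     return not positive_indices or (
--         len(positive_indices) == 1 and all(
--             i == positive_indices[0] or -diffs[i] >= diffs[positive_indices[0]] for i in range(len(diffs))
--         )
--     )
-- ===== SOURCE B (Python) =====
-- def solve(a, b):
--     diffs = sorted((b[i] - a[i] for i in range(len(a))), reverse=True)
--     return len(diffs) <= 1 or diffs[0] + diffs[1] <= 0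
-- ===== Notes on version B (the rewrite author's own statement) =====
-- stated objective: alternative
-- what changed: B sorts the diffs in descending order and decides feasibility from the two largest values alone (feasible iff n<=1 or diffs[0]+diffs[1]<=0), replacing A's positive-index collection and per-index all()-scan against the unique positive diff.
import Mathlib
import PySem

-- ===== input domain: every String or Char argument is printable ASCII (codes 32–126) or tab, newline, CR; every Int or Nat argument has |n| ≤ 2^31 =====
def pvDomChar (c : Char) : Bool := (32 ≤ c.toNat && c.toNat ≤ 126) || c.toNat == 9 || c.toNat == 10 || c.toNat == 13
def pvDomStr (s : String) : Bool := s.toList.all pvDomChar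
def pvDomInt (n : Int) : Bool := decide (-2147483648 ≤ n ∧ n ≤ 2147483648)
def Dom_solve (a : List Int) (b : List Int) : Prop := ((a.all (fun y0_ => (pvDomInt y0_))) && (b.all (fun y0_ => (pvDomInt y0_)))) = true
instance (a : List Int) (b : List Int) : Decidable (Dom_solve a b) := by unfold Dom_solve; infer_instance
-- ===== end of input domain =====

-- B sorts the diffs descending and decides from the top two values (n<=1 or diffs[0]+diffs[1]<=0); a different algorithm from A's index scans, proved to return the same Bool on Pre_.

-- ===== PORT A =====
def solve (a : List Int) (b : List Int) : Bool :=
  let diffs := (PySem.List.pyRange 0 a.length 1).map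
    (fun i => PySem.List.pyGetD b i 0 - PySem.List.pyGetD a i 0)
  let positive_indices :=
    ((PySem.List.enumerate diffs 0).filter (fun p => decide (0 < p.2))).map (fun p => p.1)
  -- positive_indices[0] : read with headD 0; Python only evaluates it under the length == 1 guard
  positive_indices.isEmpty ||
    ((positive_indices.length == 1) &&
      ((PySem.List.pyRange 0 diffs.length 1).all (fun i =>
        (i == positive_indices.headD 0) ||
        decide (PySem.List.pyGetD diffs (positive_indices.headD 0) 0
                  ≤ -(PySem.List.pyGetD diffs i 0)))))

-- ===== PORT B =====
def solve_alt (a : List Int) (b : List Int) : Bool :=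
  let diffs := PySem.List.sorted
    ((PySem.List.pyRange 0 a.length 1).map
      (fun i => PySem.List.pyGetD b i 0 - PySem.List.pyGetD a i 0))
    (fun x => x) true
  -- diffs[0], diffs[1] are only read when length ≥ 2, so pyGetD with default 0 is exact
  decide (diffs.length ≤ 1) ||
    decide (PySem.List.pyGetD diffs 0 0 + PySem.List.pyGetD diffs 1 0 ≤ 0)

-- ===== PRECONDITION & SPEC =====
-- Pre_ excludes exactly the inputs where b is shorter than a: there both A and B raise IndexError on b[i].
def Pre_solve (a : List Int) (b : List Int) : Prop := a.length ≤ b.length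
instance (a : List Int) (b : List Int) : Decidable (Pre_solve a b) := by unfold Pre_solve; infer_instance
def pvWitness_solve : List Int × List Int := ([1, 2], [2, 3])

def Spec_solve (a : List Int) (b : List Int) (out : Bool) : Prop := out = solve_alt a b
instance (a : List Int) (b : List Int) (out : Bool) : Decidable (Spec_solve a b out) := by unfold Spec_solve; infer_instance

-- ===== CLAIM (what is proved, stated in full; the proofs are below) =====
def Claim_equal_solve : Prop := ∀ (a : List Int) (b : List Int), Dom_solve a b → Pre_solve a b → Spec_solve a b (solve a b)

-- ===== LEMMAS AND PROOFS =====

-- the common mathematical content: both programs decide "every pair of distinct positions sums to ≤ 0"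
def pvPair (x y : Int) : Prop := x + y ≤ 0

def pvA (l : List Int) : Bool :=
  let positive_indices :=
    ((PySem.List.enumerate l 0).filter (fun p => decide (0 < p.2))).map (fun p => p.1)
  positive_indices.isEmpty ||
    ((positive_indices.length == 1) &&
      ((PySem.List.pyRange 0 l.length 1).all (fun i =>
        (i == positive_indices.headD 0) ||
        decide (PySem.List.pyGetD l (positive_indices.headD 0) 0
                  ≤ -(PySem.List.pyGetD l i 0)))))

def pvB (l : List Int) : Bool :=
  let s := PySem.List.sorted l (fun x => x) true
  decide (s.length ≤ 1) || decide (PySem.List.pyGetD s 0 0 + PySem.List.pyGetD s 1 0 ≤ 0)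

lemma solve_eq_pvA (a b : List Int) :
    solve a b = pvA ((PySem.List.pyRange 0 a.length 1).map
      (fun i => PySem.List.pyGetD b i 0 - PySem.List.pyGetD a i 0)) := rfl

lemma solve_alt_eq_pvB (a b : List Int) :
    solve_alt a b = pvB ((PySem.List.pyRange 0 a.length 1).map
      (fun i => PySem.List.pyGetD b i 0 - PySem.List.pyGetD a i 0)) := rfl

lemma map_snd_posFiltered (l : List Int) :
    (((PySem.List.enumerate l 0).filter (fun p => decide (0 < p.2))).map (fun p => p.2))
      = l.filter (fun x => decide (0 < x)) := by
  have h := List.filter_map (f := fun p : Int × Int => p.2) (p := fun x : Int => decide (0 < x))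
    (l := PySem.List.enumerate l 0)
  simp only [PySem.List.map_snd_enumerate] at h
  rw [h]
  rfl

lemma pvPair_symm : Symmetric pvPair := by
  intro x y h
  unfold pvPair at *
  omega

-- on a descending list, "the two largest sum to ≤ 0" is exactly the pairwise condition
lemma desc_top2 (s : List Int) (hdesc : s.Pairwise (fun a b : Int => b ≤ a)) :
    ((decide (s.length ≤ 1) ||
      decide (PySem.List.pyGetD s 0 0 + PySem.List.pyGetD s 1 0 ≤ 0)) = true)
      ↔ s.Pairwise pvPair := by
  by_cases hlen : s.length ≤ 1
  · constructor
    · intro _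
      match s, hlen with
      | [], _ => exact List.Pairwise.nil
      | [x], _ => simp [pvPair]
    · intro _
      simp [hlen]
  · have hgt : 1 < s.length := by omega
    have h0 : (0 : Int) < (s.length : Int) := by exact_mod_cast Nat.lt_of_lt_of_le Nat.zero_lt_one hgt.le
    have h1 : (1 : Int) < (s.length : Int) := by exact_mod_cast hgt
    have hmono : ∀ i j (hi : i < s.length) (hj : j < s.length), i ≤ j → s[j] ≤ s[i] := by
      intro i j hi hj hij
      rcases eq_or_lt_of_le hij with rfl | hlt
      · exact le_refl _
      · exact (List.pairwise_iff_getElem.mp hdesc) i j hi hj hlt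
    rw [PySem.List.pyGetD_eq_getElem s 0 (by norm_num) h0,
        PySem.List.pyGetD_eq_getElem s 0 (by norm_num) h1]
    simp only [Int.toNat_zero, Int.toNat_one] at *
    simp only [decide_eq_false hlen, Bool.false_or, decide_eq_true_eq]
    constructor
    · intro h
      rw [List.pairwise_iff_getElem]
      intro i j hi hj hij
      have e1 : s[i] ≤ s[0] := hmono 0 i (by omega) hi (by omega)
      have e2 : s[j] ≤ s[1] := hmono 1 j (by omega) hj (by omega)
      unfold pvPair
      omega
    · intro h
      exact (List.pairwise_iff_getElem.mp h) 0 1 (by omega) hgt (by omega)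

-- B computes the pairwise condition
lemma pvB_char (l : List Int) : pvB l = true ↔ l.Pairwise pvPair := by
  have hperm : (PySem.List.sorted l (fun x => x) true).Perm l :=
    PySem.List.sorted_perm l (fun x => x) true
  have hdesc : (PySem.List.sorted l (fun x => x) true).Pairwise (fun a b : Int => b ≤ a) :=
    PySem.List.sorted_pairwise_rev l (fun x => x)
  unfold pvB
  rw [desc_top2 _ hdesc]
  exact List.Perm.pairwise_iff (fun h => pvPair_symm h) hperm

-- A computes the pairwise condition
lemma pvA_char (l : List Int) : pvA l = true ↔ l.Pairwise pvPair := by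
  have hsnd := map_snd_posFiltered l
  rcases hf : l.filter (fun x => decide (0 < x)) with _ | ⟨v, _ | ⟨v2, rest⟩⟩
  · -- no positive element: A returns true and the pairwise condition holds
    have he : (PySem.List.enumerate l 0).filter (fun p => decide (0 < p.2)) = [] := by
      have h0 : (((PySem.List.enumerate l 0).filter (fun p => decide (0 < p.2))).map
          (fun p => p.2)).length = 0 := by rw [hsnd, hf]; simp
      rw [List.length_map] at h0
      exact List.length_eq_zero_iff.mp h0
    have hA : pvA l = true := by simp [pvA, he]
    have hnp : ∀ x ∈ l, ¬ 0 < x := by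
      intro x hx hpos
      have : x ∈ l.filter (fun x => decide (0 < x)) :=
        List.mem_filter.mpr ⟨hx, by simpa using hpos⟩
      rw [hf] at this
      simp at this
    have hP : l.Pairwise pvPair := by
      rw [List.pairwise_iff_getElem]
      intro i j hi hj hij
      have e1 := hnp l[i] (List.getElem_mem hi)
      have e2 := hnp l[j] (List.getElem_mem hj)
      unfold pvPair
      omega
    simp [hA, hP]
  · -- exactly one positive element
    have hlen1 : ((PySem.List.enumerate l 0).filter (fun p => decide (0 < p.2))).length = 1 := by
      have h1 := congrArg List.length hsnd
      rw [List.length_map, hf] at h1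
      simpa using h1
    obtain ⟨q, hq⟩ := List.length_eq_one_iff.mp hlen1
    have hq2 : q.2 = v := by
      have h2 := hsnd; rw [hq, hf] at h2; simpa using h2
    have hqe : q ∈ PySem.List.enumerate l 0 ∧ decide (0 < q.2) = true :=
      List.mem_filter.mp (by rw [hq]; exact List.mem_singleton_self q)
    obtain ⟨k, hk, hqk⟩ := (PySem.List.mem_enumerate_iff l 0 q).mp hqe.1
    have hq1 : q.1 = (k : Int) := by rw [hqk]; simp
    have hlk : l[k] = v := by
      have h3 := hq2; rw [hqk] at h3; simpa using h3
    have hvpos : 0 < v := by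
      have h4 := hqe.2; rw [hq2] at h4; exact of_decide_eq_true h4
    have huniq : ∀ (j : Nat) (hj : j < l.length), j ≠ k → ¬ 0 < l[j] := by
      intro j hj hjk hpos
      have hmem : ((j : Int), l[j]) ∈ PySem.List.enumerate l 0 :=
        (PySem.List.mem_enumerate_iff l 0 _).mpr ⟨j, hj, by simp⟩
      have hin : ((j : Int), l[j]) ∈ [q] := by
        rw [← hq]; exact List.mem_filter.mpr ⟨hmem, by simpa using hpos⟩
      have heq : ((j : Int), l[j]) = q := by simpa using hin
      apply hjk
      have h5 := congrArg Prod.fst heq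
      rw [hq1] at h5
      have h5' : ((j : Int)) = ((k : Int)) := by simpa using h5
      exact_mod_cast h5'
    have hgk : PySem.List.pyGetD l ((k : Int)) 0 = v := by
      rw [PySem.List.pyGetD_natCast, List.getD_eq_getElem l 0 hk, hlk]
    have hA : pvA l =
        ((PySem.List.pyRange 0 l.length 1).all (fun i =>
          (i == ((k : Int))) ||
          decide (PySem.List.pyGetD l ((k : Int)) 0 ≤ -(PySem.List.pyGetD l i 0)))) := by
      simp [pvA, hq, hq1]
    rw [hA]
    constructor
    · -- the all()-scan passes → pairwise
      intro h
      rw [List.all_eq_true] at h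
      rw [List.pairwise_iff_getElem]
      intro i j hi hj hij
      have scan : ∀ (m : Nat) (hm : m < l.length), m ≠ k → l[k] + l[m] ≤ 0 := by
        intro m hm hmk
        have hmi : ((m : Int)) ∈ PySem.List.pyRange 0 (l.length : Int) 1 :=
          (PySem.List.mem_pyRange_one).mpr ⟨by positivity, by exact_mod_cast hm⟩
        have h6 := h ((m : Int)) hmi
        have hbeq : (((m : Int)) == ((k : Int))) = false := by
          rw [beq_eq_false_iff_ne]
          intro hcast; exact hmk (by exact_mod_cast hcast)
        have hgm : PySem.List.pyGetD l ((m : Int)) 0 = l[m] := by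
          rw [PySem.List.pyGetD_natCast, List.getD_eq_getElem l 0 hm]
        rw [hbeq, hgk, hgm, Bool.false_or, decide_eq_true_eq] at h6
        rw [hlk]
        omega
      by_cases hik : i = k
      · subst hik
        have := scan j hj (by omega)
        unfold pvPair; omega
      · by_cases hjk : j = k
        · subst hjk
          have := scan i hi hik
          unfold pvPair; omega
        · have e1 := huniq i hi hik
          have e2 := huniq j hj hjk
          unfold pvPair; omega
    · -- pairwise → the all()-scan passes
      intro h
      have hP := List.pairwise_iff_getElem.mp h
      rw [List.all_eq_true]
      intro i hi
      obtain ⟨hi0, hilen⟩ := (PySem.List.mem_pyRange_one).mp hi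
      obtain ⟨j, rfl⟩ : ∃ j : Nat, i = (j : Int) := ⟨i.toNat, (Int.toNat_of_nonneg hi0).symm⟩
      have hjlen : j < l.length := by exact_mod_cast hilen
      by_cases hjk : j = k
      · have hb : (((j : Int)) == ((k : Int))) = true := by rw [beq_iff_eq, hjk]
        simp [hb]
      · have hgi : PySem.List.pyGetD l ((j : Int)) 0 = l[j] := by
          rw [PySem.List.pyGetD_natCast, List.getD_eq_getElem l 0 hjlen]
        have hsum : l[k] + l[j] ≤ 0 := by
          rcases Nat.lt_or_ge j k with hlt | hge
          · have := hP j k hjlen hk hlt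
            unfold pvPair at this; omega
          · have hlt : k < j := by omega
            have := hP k j hk hjlen hlt
            unfold pvPair at this; omega
        have hd : decide (PySem.List.pyGetD l ((k : Int)) 0
            ≤ -(PySem.List.pyGetD l ((j : Int)) 0)) = true := by
          rw [hgk, hgi, decide_eq_true_eq, hlk] at *
          omega
        rw [hd, Bool.or_true]
  · -- two or more positive elements: A returns false and the pairwise condition fails
    have hlen2 : ((PySem.List.enumerate l 0).filter (fun p => decide (0 < p.2))).length
        = rest.length + 2 := by
      have h1 := congrArg List.length hsnd
      rw [List.length_map, hf] at h1
      simpa using h1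
    have hA : pvA l = false := by
      rcases hE : (PySem.List.enumerate l 0).filter (fun p => decide (0 < p.2)) with _ | ⟨q1, e'⟩
      · rw [hE] at hlen2; simp at hlen2
      · have he' : e'.length = rest.length + 1 := by
          rw [hE] at hlen2; simpa using hlen2
        simp only [pvA, hE, List.map_cons, List.isEmpty_cons, List.length_cons,
          List.length_map, he', Bool.false_or]
        have : (rest.length + 1 + 1 == 1) = false := by
          rw [beq_eq_false_iff_ne]; omega
        simp [this]
    have hsub : List.Sublist [v, v2] l := by
      have h7 : List.Sublist [v, v2] (l.filter (fun x => decide (0 < x))) := by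
        rw [hf]
        exact ((List.nil_sublist rest).cons₂ v2).cons₂ v
      exact h7.trans List.filter_sublist
    have hvpos : 0 < v := by
      have : v ∈ l.filter (fun x => decide (0 < x)) := by rw [hf]; simp
      simpa using (List.mem_filter.mp this).2
    have hv2pos : 0 < v2 := by
      have : v2 ∈ l.filter (fun x => decide (0 < x)) := by rw [hf]; simp
      simpa using (List.mem_filter.mp this).2
    have hP : ¬ l.Pairwise pvPair := by
      intro h
      have h8 := h.sublist hsub
      have h9 : pvPair v v2 := List.rel_of_pairwise_cons h8 (List.mem_singleton_self v2)
      unfold pvPair at h9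
      omega
    simp [hA, hP]

-- ===== VERDICT (by name: the statement is the Claim_ definition above) =====
theorem solve_spec : Claim_equal_solve := by
  intro a b _ _
  unfold Spec_solve
  rw [solve_eq_pvA, solve_alt_eq_pvB, Bool.eq_iff_iff, pvA_char, pvB_char]
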